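-- pv_equiv track=rewrite | github.com/MarinCervinschi/Advent_Of_Code | 2024/day_09/main_09.py | no_block_len
-- ===== SOURCE A (Python) =====
-- def no_block_len(disk, len_block, k):
--     i, n = 0, len(disk)
--     while i < n and i <= k:
--         if disk[i] == '.':
--             start_index_free_space = i
--             len_no_block = 0
--             while i < n and disk[i] == '.':
--                 len_no_block += 1
--                 i += 1
--             if len_block <= len_no_block:
--                 return len_no_block, start_index_free_space
--             else:
--                 continue
--         i += 1
--     return 0, 0
-- ===== SOURCE B (Python) =====
-- def no_block_len(disk, len_block, k):
--     # Phase 1: one pass collecting every maximal '.'-run as (start, length).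
--     runs = []
--     start = None
--     for i, c in enumerate(disk):
--         if c == '.':
--             if start is None:
--                 start = i
--         elif start is not None:
--             runs.append((start, i - start))
--             start = None
--     if start is not None:
--         runs.append((start, len(disk) - start))
--     # Phase 2: first run that starts no later than k and fits the block.
--     for s, l in runs:
--         if s <= k and len_block <= l:
--             return l, s
--     return 0, 0
-- ===== Notes on version B (the rewrite author's own statement) =====
-- stated objective: alternative
-- what changed: Replaces the hand-rolled nested while-loops with interleaved early returns by a two-phase decomposition: one state-machine pass materialises all maximal free-space runs as (start,length) pairs, then a separate linear search returns the first run with start <= k and length >= len_block.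
import Mathlib
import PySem

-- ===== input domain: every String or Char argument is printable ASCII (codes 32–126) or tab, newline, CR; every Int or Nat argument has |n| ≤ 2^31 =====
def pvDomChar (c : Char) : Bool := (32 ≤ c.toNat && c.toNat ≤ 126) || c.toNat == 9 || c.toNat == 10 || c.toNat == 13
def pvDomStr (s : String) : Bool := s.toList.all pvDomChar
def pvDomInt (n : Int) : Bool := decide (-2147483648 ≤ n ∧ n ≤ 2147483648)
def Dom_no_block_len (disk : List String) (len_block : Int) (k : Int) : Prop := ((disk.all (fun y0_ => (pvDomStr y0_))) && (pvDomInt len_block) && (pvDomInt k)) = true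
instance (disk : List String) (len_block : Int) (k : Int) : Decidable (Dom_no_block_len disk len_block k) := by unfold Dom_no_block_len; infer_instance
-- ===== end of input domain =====

-- B replaces A's interleaved nested while-loops by a two-phase decomposition (one pass collecting all
-- maximal '.'-runs, then a separate search); same return value, proved identical on all inputs.

-- ===== PORT A =====
-- inner 'while i < n and disk[i] == "."' loop; fuel is a totality guard only
-- (any fuel ≥ n - i reproduces the Python loop exactly, see aInner_eq below)
def aInner (disk : List String) (n : Int) : Nat → Int → Int → Int × Int
  | 0, i, len_no_block => (len_no_block, i)
  | fuel + 1, i, len_no_block =>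
    if i < n ∧ PySem.List.pyGet? disk i = some "." then
      aInner disk n fuel (i + 1) (len_no_block + 1)
    else
      (len_no_block, i)

-- outer 'while i < n and i <= k' loop; fuel is a totality guard only
def aOuter (disk : List String) (n len_block k : Int) : Nat → Int → Int × Int
  | 0, _ => (0, 0)
  | fuel + 1, i =>
    if i < n ∧ i ≤ k then
      if PySem.List.pyGet? disk i = some "." then
        let p := aInner disk n fuel i 0
        if len_block ≤ p.1 then (p.1, i)
        else aOuter disk n len_block k fuel p.2
      else aOuter disk n len_block k fuel (i + 1)
    else
      (0, 0)

def no_block_len (disk : List String) (len_block : Int) (k : Int) : Int × Int :=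
  aOuter disk disk.length len_block k (disk.length + 1) 0

-- ===== PORT B =====
def bStep (st : List (Int × Int) × Option Int) (p : Int × String) : List (Int × Int) × Option Int :=
  if p.2 = "." then
    match st.2 with
    | none => (st.1, some p.1)
    | some s => (st.1, some s)
  else
    match st.2 with
    | some s => (st.1 ++ [(s, p.1 - s)], none)
    | none => (st.1, none)

def bSearch (runs : List (Int × Int)) (len_block k : Int) : Int × Int :=
  match runs with
  | [] => (0, 0)
  | (s, l) :: t => if s ≤ k ∧ len_block ≤ l then (l, s) else bSearch t len_block k

def no_block_len_alt (disk : List String) (len_block : Int) (k : Int) : Int × Int :=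
  let st := (PySem.List.enumerate disk).foldl bStep ([], none)
  let runs :=
    match st.2 with
    | some s => st.1 ++ [(s, (disk.length : Int) - s)]
    | none => st.1
  bSearch runs len_block k

-- ===== PRECONDITION & SPEC =====
def Spec_no_block_len (disk : List String) (len_block : Int) (k : Int) (out : Int × Int) : Prop := out = no_block_len_alt disk len_block k
instance (disk : List String) (len_block : Int) (k : Int) (out : Int × Int) : Decidable (Spec_no_block_len disk len_block k out) := by unfold Spec_no_block_len; infer_instance

-- ===== CLAIM (what is proved, stated in full; the proofs are below) =====
def Claim_equal_no_block_len : Prop := ∀ (disk : List String) (len_block : Int) (k : Int), Dom_no_block_len disk len_block k → Spec_no_block_len disk len_block k (no_block_len disk len_block k)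

-- ===== LEMMAS AND PROOFS =====

def dots : List String → Nat
  | [] => 0
  | c :: t => if c = "." then dots t + 1 else 0

def R : List String → Int → List (Int × Int)
  | [], _ => []
  | c :: t, i =>
    if c = "." then (i, (1 + dots t : Int)) :: R (t.drop (dots t)) (i + 1 + dots t)
    else R t (i + 1)
termination_by l => l.length
decreasing_by
  · simp only [List.length_cons, List.length_drop]; omega
  · simp

theorem R_cons_dot (t : List String) (i : Int) :
    R ("." :: t) i = (i, (1 + dots t : Int)) :: R (t.drop (dots t)) (i + 1 + dots t) := by
  rw [R]; simp

theorem R_cons_ne (c : String) (t : List String) (i : Int) (hc : c ≠ ".") :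
    R (c :: t) i = R t (i + 1) := by
  rw [R]; simp [hc]

theorem R_start_ge (l : List String) (i : Int) : ∀ p ∈ R l i, i ≤ p.1 := by
  fun_induction R with
  | case1 i => simp
  | case2 t i ih =>
    intro p hp
    rcases List.mem_cons.mp hp with h | h
    · subst h; simp
    · have := ih p h; omega
  | case3 c t i hc ih =>
    intro p hp
    have := ih p hp; omega
theorem bSearch_none (runs : List (Int × Int)) (len_block k : Int)
    (h : ∀ p ∈ runs, ¬ p.1 ≤ k) : bSearch runs len_block k = (0, 0) := by
  induction runs with
  | nil => rfl
  | cons p t ih =>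
    obtain ⟨s, l⟩ := p
    have hs : ¬ s ≤ k := h (s, l) (by simp)
    rw [bSearch.eq_def]
    simp only [hs, false_and, if_neg, not_false_iff]
    exact ih fun q hq => h q (by simp [hq])

theorem aInner_eq (disk : List String) : ∀ (fuel : Nat) (i len0 : Int), 0 ≤ i →
    (disk.length : Int) - i ≤ fuel →
    aInner disk disk.length fuel i len0 =
      (len0 + dots (disk.drop i.toNat), i + dots (disk.drop i.toNat)) := by
  intro fuel
  induction fuel with
  | zero =>
    intro i len0 hi hf
    have : disk.drop i.toNat = [] := List.drop_eq_nil_of_le (by omega)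
    rw [aInner, this]
    simp [dots]
  | succ fuel ih =>
    intro i len0 hi hf
    rw [aInner]
    by_cases hc : i < (disk.length : Int) ∧ PySem.List.pyGet? disk i = some "."
    · have hlt : i.toNat < disk.length := by omega
      have hget : disk[i.toNat] = "." := by
        have h2 := hc.2
        rw [PySem.List.pyGet?_of_nonneg disk hi] at h2
        simp [List.getElem?_eq_getElem hlt] at h2
        exact h2
      have hdrop : disk.drop i.toNat = "." :: disk.drop (i.toNat + 1) :=
        hget ▸ List.drop_eq_getElem_cons hlt
      have htn : (i + 1).toNat = i.toNat + 1 := by omega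
      rw [if_pos hc, ih (i + 1) (len0 + 1) (by omega) (by omega), hdrop, htn]
      have hd : dots ("." :: disk.drop (i.toNat + 1)) = dots (disk.drop (i.toNat + 1)) + 1 := by
        simp [dots]
      rw [hd]
      simp only [Prod.mk.injEq]
      constructor <;> push_cast <;> ring
    · rw [if_neg hc]
      have hd : dots (disk.drop i.toNat) = 0 := by
        by_cases hn : i < (disk.length : Int)
        · have hlt : i.toNat < disk.length := by omega
          have hget : disk[i.toNat] ≠ "." := by
            intro hcontra
            apply hc
            refine ⟨hn, ?_⟩
            rw [PySem.List.pyGet?_of_nonneg disk hi]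
            simp [List.getElem?_eq_getElem hlt, hcontra]
          rw [List.drop_eq_getElem_cons hlt]
          simp [dots, hget]
        · have : disk.drop i.toNat = [] := List.drop_eq_nil_of_le (by omega)
          rw [this]; rfl
      rw [hd]
      simp

theorem aOuter_eq (disk : List String) (len_block k : Int) : ∀ (fuel : Nat) (i : Int), 0 ≤ i →
    (disk.length : Int) - i < fuel →
    aOuter disk disk.length len_block k fuel i = bSearch (R (disk.drop i.toNat) i) len_block k := by
  intro fuel
  induction fuel with
  | zero =>
    intro i hi hf
    have : disk.drop i.toNat = [] := List.drop_eq_nil_of_le (by omega)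
    rw [aOuter, this, R]
    rfl
  | succ fuel ih =>
    intro i hi hf
    rw [aOuter]
    by_cases h : i < (disk.length : Int) ∧ i ≤ k
    · rw [if_pos h]
      by_cases hdot : PySem.List.pyGet? disk i = some "."
      · rw [if_pos hdot]
        have hlt : i.toNat < disk.length := by omega
        have hget : disk[i.toNat] = "." := by
          rw [PySem.List.pyGet?_of_nonneg disk hi] at hdot
          simp [List.getElem?_eq_getElem hlt] at hdot
          exact hdot
        have hdrop : disk.drop i.toNat = "." :: disk.drop (i.toNat + 1) :=
          hget ▸ List.drop_eq_getElem_cons hlt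
        have hp : aInner disk disk.length fuel i 0 =
            (0 + (dots (disk.drop i.toNat) : Int), i + dots (disk.drop i.toNat)) :=
          aInner_eq disk fuel i 0 hi (by omega)
        have hd : dots (disk.drop i.toNat) = dots (disk.drop (i.toNat + 1)) + 1 := by
          rw [hdrop]; simp [dots]
        set d2 := dots (disk.drop (i.toNat + 1)) with hd2
        rw [hdrop, R_cons_dot, bSearch, hp]
        by_cases hret : len_block ≤ 0 + (dots (disk.drop i.toNat) : Int)
        · rw [if_pos hret, if_pos ⟨h.2, by omega⟩]
          simp only [Prod.mk.injEq]
          exact ⟨by omega, trivial⟩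
        · rw [if_neg hret, if_neg (by intro hcontra; omega)]
          have hp2 : i + (dots (disk.drop i.toNat) : Int) = i + 1 + (d2 : Int) := by omega
          rw [hp2, ih (i + 1 + (d2 : Int)) (by omega) (by omega)]
          congr 1
          have htn : (i + 1 + (d2 : Int)).toNat = i.toNat + 1 + d2 := by omega
          rw [htn, List.drop_drop]
      · rw [if_neg hdot]
        have hlt : i.toNat < disk.length := by omega
        have hget : disk[i.toNat] ≠ "." := by
          intro hcontra
          apply hdot
          rw [PySem.List.pyGet?_of_nonneg disk hi]
          simp [List.getElem?_eq_getElem hlt, hcontra]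
        have hdrop : disk.drop i.toNat = disk[i.toNat] :: disk.drop (i.toNat + 1) :=
          List.drop_eq_getElem_cons hlt
        rw [hdrop, R_cons_ne _ _ _ hget, ih (i + 1) (by omega) (by omega)]
        have : (i + 1).toNat = i.toNat + 1 := by omega
        rw [this]
    · rw [if_neg h]
      by_cases hn : i < (disk.length : Int)
      · have hk : k < i := by omega
        rw [bSearch_none _ _ _ ?_]
        intro p hp
        have := R_start_ge (disk.drop i.toNat) i p hp
        omega
      · have : disk.drop i.toNat = [] := List.drop_eq_nil_of_le (by omega)
        rw [this, R]
        rfl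

-- proof-side finalizer (definitionally the match in no_block_len_alt)
def finL (st : List (Int × Int) × Option Int) (iend : Int) : List (Int × Int) :=
  match st.2 with
  | some s => st.1 ++ [(s, iend - s)]
  | none => st.1

theorem fold_spec (l : List String) : ∀ (i : Int) (acc : List (Int × Int)),
    (finL ((PySem.List.enumerate l i).foldl bStep (acc, none)) (i + l.length) = acc ++ R l i) ∧
    ∀ s : Int, finL ((PySem.List.enumerate l i).foldl bStep (acc, some s)) (i + l.length)
      = acc ++ (s, (i + dots l : Int) - s) :: R (l.drop (dots l)) (i + dots l) := by
  induction l with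
  | nil =>
    intro i acc
    constructor
    · simp [PySem.List.enumerate_nil, finL, R]
    · intro s; simp [PySem.List.enumerate_nil, finL, R, dots]
  | cons c t ih =>
    intro i acc
    have hlen : (i + ((c :: t).length : Int)) = (i + 1) + (t.length : Int) := by
      simp [List.length_cons]; ring
    constructor
    · rw [PySem.List.enumerate_cons, List.foldl_cons, hlen]
      by_cases hc : c = "."
      · have hb : bStep (acc, none) (i, c) = (acc, some i) := by simp [bStep, hc]
        rw [hb, (ih (i + 1) acc).2 i]
        subst hc
        rw [R_cons_dot]
        have h1 : ((i + 1 : Int) + (dots t : Int)) - i = 1 + (dots t : Int) := by omega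
        have h2 : ((i + 1 : Int) + (dots t : Int)) = i + 1 + (dots t : Int) := by ring
        rw [h1, h2]
      · have hb : bStep (acc, none) (i, c) = (acc, none) := by simp [bStep, hc]
        rw [hb, (ih (i + 1) acc).1, R_cons_ne c t i hc]
    · intro s
      rw [PySem.List.enumerate_cons, List.foldl_cons, hlen]
      by_cases hc : c = "."
      · have hb : bStep (acc, some s) (i, c) = (acc, some s) := by simp [bStep, hc]
        rw [hb, (ih (i + 1) acc).2 s]
        have hd : dots (c :: t) = dots t + 1 := by simp [dots, hc]
        rw [hd]
        have h1 : (i + ((dots t + 1 : Nat) : Int)) = (i + 1) + (dots t : Int) := by push_cast; ring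
        have h2 : (c :: t).drop (dots t + 1) = t.drop (dots t) := by simp
        rw [h1, h2]
      · have hb : bStep (acc, some s) (i, c) = (acc ++ [(s, i - s)], none) := by simp [bStep, hc]
        rw [hb, (ih (i + 1) (acc ++ [(s, i - s)])).1]
        have hd : dots (c :: t) = 0 := by simp [dots, hc]
        rw [hd]
        simp only [List.drop_zero, Nat.cast_zero, add_zero]
        rw [R_cons_ne c t i hc]
        simp
theorem alt_eq_search (disk : List String) (len_block k : Int) :
    no_block_len_alt disk len_block k = bSearch (R disk 0) len_block k := by
  have h := (fold_spec disk 0 []).1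
  simp only [zero_add] at h
  show bSearch (finL ((PySem.List.enumerate disk 0).foldl bStep ([], none)) disk.length) len_block k
      = bSearch (R disk 0) len_block k
  rw [h]
  simp

-- ===== VERDICT (by name: the statement is the Claim_ definition above) =====
theorem no_block_len_spec : Claim_equal_no_block_len := by
  intro disk len_block k _
  unfold Spec_no_block_len no_block_len
  rw [alt_eq_search, aOuter_eq disk len_block k (disk.length + 1) 0 le_rfl (by omega)]
  simp
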